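-- pv_equiv track=rewrite | github.com/richardhuang11/receiptreader | body.py | get_total_counts
-- ===== SOURCE A (Python) =====
-- from collections import defaultdict, OrderedDict
--
-- def get_total_counts(person_item, item_price):
--   item_counts = defaultdict(int)
--   for item in item_price:
--     item_counts[item] = 0
--   for item in item_price:
--     for person in person_item:
--       if item in person_item[person]:
--         item_counts[item] += 1
--   return item_counts
-- ===== SOURCE B (Python) =====
-- from collections import Counter
--
-- def get_total_counts(person_item, item_price):
--   counts = Counter()
--   for items in person_item.values():
--     counts.update(set(items))
--   out = {}
--   for item in item_price:
--     out[item] = counts[item]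
--   return out
-- ===== Notes on version B (the rewrite author's own statement) =====
-- stated objective: faster
-- what changed: Replaces A's per-priced-item scan over all persons with a Counter built in one pass over the persons' deduplicated item lists, followed by a single mapping pass that reads each priced item's count (0 if absent) into a fresh dict.
import Mathlib
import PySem

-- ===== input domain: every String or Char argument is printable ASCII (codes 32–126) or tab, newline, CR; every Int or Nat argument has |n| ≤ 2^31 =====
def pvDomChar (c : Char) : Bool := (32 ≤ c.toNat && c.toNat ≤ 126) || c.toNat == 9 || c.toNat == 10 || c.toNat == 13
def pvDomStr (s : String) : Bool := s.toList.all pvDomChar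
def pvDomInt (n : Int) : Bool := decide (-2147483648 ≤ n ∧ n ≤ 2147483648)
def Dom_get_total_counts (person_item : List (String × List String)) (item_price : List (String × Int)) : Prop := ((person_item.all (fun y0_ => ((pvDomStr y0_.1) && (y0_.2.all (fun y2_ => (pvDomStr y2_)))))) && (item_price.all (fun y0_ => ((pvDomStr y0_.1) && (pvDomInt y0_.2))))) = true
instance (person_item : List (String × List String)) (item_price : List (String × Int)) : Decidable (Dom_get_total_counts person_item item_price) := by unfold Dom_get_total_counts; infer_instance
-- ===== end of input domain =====

-- B replaces A's per-priced-item scan over all persons with a Counter built in one pass over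
-- the persons' deduplicated item lists plus a final mapping pass: asymptotically faster, same result.


-- ===== PORT A =====
-- A, step for step: item_counts = defaultdict(int); zero every key of item_price; then
-- for each priced item, for each person, if item in person_item[person] increment.
-- (person_item[person] cannot raise: person ranges over person_item's own keys, so getD's
-- default is never used — the lookup is exact.)
def get_total_counts (person_item : List (String × List String)) (item_price : List (String × Int)) : List (String × Int) :=
  let pd := PySem.Dict.ofList person_item
  let ipd := PySem.Dict.ofList item_price
  let item_counts : PySem.Dict String Int :=
    ipd.keys.foldl (fun d item => d.insert item 0) PySem.Dict.empty
  let item_counts :=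
    ipd.keys.foldl (fun d item =>
      pd.keys.foldl (fun d person =>
        if (pd.getD person []).contains item then d.modify item 0 (· + 1) else d) d)
      item_counts
  item_counts.items

-- ===== PORT B =====
-- B (Source B): counts = Counter(); for each person's VALUE list, counts.update(set(items))
-- (Counter.update over a set adds 1 per distinct element; set iteration order is hash order,
-- harmless here since only final counts are read); then out[item] = counts[item] for each
-- priced item (Counter lookup defaults to 0).
def get_total_counts_alt (person_item : List (String × List String)) (item_price : List (String × Int)) : List (String × Int) :=
  let counts : PySem.Dict String Int :=
    (PySem.Dict.ofList person_item).values.foldl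
      (fun c items => (PySem.Set.ofList items).foldl (fun c it => c.modify it 0 (· + 1)) c)
      PySem.Dict.empty
  let out : PySem.Dict String Int :=
    (PySem.Dict.ofList item_price).keys.foldl
      (fun o item => o.insert item (counts.getD item 0)) PySem.Dict.empty
  out.items

-- ===== PRECONDITION & SPEC =====
def Spec_get_total_counts (person_item : List (String × List String)) (item_price : List (String × Int)) (out : List (String × Int)) : Prop := out = get_total_counts_alt person_item item_price
instance (person_item : List (String × List String)) (item_price : List (String × Int)) (out : List (String × Int)) : Decidable (Spec_get_total_counts person_item item_price out) := by unfold Spec_get_total_counts; infer_instance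

-- ===== CLAIM =====
def Claim_equal_get_total_counts : Prop := ∀ (person_item : List (String × List String)) (item_price : List (String × Int)), Dom_get_total_counts person_item item_price → Spec_get_total_counts person_item item_price (get_total_counts person_item item_price)

-- ===== LEMMAS AND PROOFS =====

-- A's zeroing loop: every lookup (with default 0) is 0.
theorem getD_zero_loop (L : List String) (d : PySem.Dict String Int) (k : String)
    (h : d.getD k 0 = 0) :
    (L.foldl (fun d item => d.insert item 0) d).getD k 0 = 0 := by
  induction L generalizing d with
  | nil => exact h
  | cons x xs ih =>
    simp only [List.foldl_cons]
    exact ih _ (by rw [PySem.Dict.getD_insert]; split <;> simp [h])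

-- A conditional-increment loop (key depends on the element): final lookup = start + count.
theorem getD_cond_modify_loop {α : Type} (l : List α) (key : α → String) (c : α → Bool)
    (d : PySem.Dict String Int) (k : String) :
    (l.foldl (fun d x => if c x then d.modify (key x) 0 (· + 1) else d) d).getD k 0
      = d.getD k 0 + (l.countP (fun x => c x && key x == k) : Int) := by
  induction l generalizing d with
  | nil => simp
  | cons x xs ih =>
    simp only [List.foldl_cons, List.countP_cons]
    by_cases hc : c x = true
    · rw [if_pos hc, ih, PySem.Dict.getD_modify]
      by_cases hk : k = key x
      · have hb : (c x && (key x == k)) = true := by simp [hc, hk]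
        rw [if_pos hk, hb, if_pos rfl, hk]
        push_cast
        omega
      · have hb : (c x && (key x == k)) = false := by
          have : (key x == k) = false := beq_eq_false_iff_ne.mpr (fun h => hk h.symm)
          simp [this]
        rw [if_neg hk, hb]
        simp
    · rw [if_neg hc, ih]
      have hb : (c x && (key x == k)) = false := by simp [hc]
      rw [hb]
      simp

-- A's conditional-increment loop never changes the key list when every fired key is present.
theorem keys_cond_modify_loop {α : Type} (l : List α) (key : α → String) (c : α → Bool)
    (d : PySem.Dict String Int) (h : ∀ x ∈ l, c x = true → key x ∈ d.keys) :
    (l.foldl (fun d x => if c x then d.modify (key x) 0 (· + 1) else d) d).keys = d.keys := by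
  induction l generalizing d with
  | nil => rfl
  | cons x xs ih =>
    simp only [List.foldl_cons]
    by_cases hc : c x = true
    · rw [if_pos hc]
      have hmem : key x ∈ d.keys := h x (List.mem_cons_self ..) hc
      have hk : (d.modify (key x) 0 (· + 1)).keys = d.keys := by
        rw [PySem.Dict.keys_modify,
            PySem.Dict.keys_insert_of_contains _ _ ((PySem.Dict.contains_iff_mem_keys _ _).2 hmem)]
      rw [ih _ (by rw [hk]; exact fun y hy => h y (List.mem_cons_of_mem _ hy)), hk]
    · rw [if_neg hc]
      exact ih _ (fun y hy => h y (List.mem_cons_of_mem _ hy))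

-- A's outer loop lookup: each priced item k (occurring once in the nodup key list)
-- collects the number of persons whose list contains it.
theorem getD_A_loop (pd : PySem.Dict String (List String)) (L : List String)
    (hL : L.Nodup) (d : PySem.Dict String Int) (k : String) :
    (L.foldl (fun d item =>
        pd.keys.foldl (fun d person =>
          if (pd.getD person []).contains item then d.modify item 0 (· + 1) else d) d) d).getD k 0
      = d.getD k 0 +
        (if k ∈ L then (pd.keys.countP (fun p => (pd.getD p []).contains k) : Int) else 0) := by
  induction L generalizing d with
  | nil => simp
  | cons x xs ih =>
    simp only [List.foldl_cons]
    rw [ih ((List.nodup_cons.1 hL).2),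
        getD_cond_modify_loop pd.keys (fun _ => x) (fun p => (pd.getD p []).contains x) d k]
    by_cases hk : k = x
    · subst hk
      have : k ∉ xs := (List.nodup_cons.1 hL).1
      simp [this]
    · have hx : (k ∈ x :: xs) ↔ k ∈ xs := by simp [hk]
      simp only [hx]
      have hz : pd.keys.countP (fun p => (pd.getD p []).contains x && x == k) = 0 :=
        List.countP_eq_zero.2 (by intro p _ hp; simp only [Bool.and_eq_true, beq_iff_eq] at hp; exact hk hp.2.symm)
      rw [hz]
      simp

-- A's nested loop never changes the key list when every outer item is already a key.
theorem keys_A_loop (pd : PySem.Dict String (List String)) (L : List String)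
    (d : PySem.Dict String Int) (h : ∀ item ∈ L, item ∈ d.keys) :
    (L.foldl (fun d item =>
        pd.keys.foldl (fun d person =>
          if (pd.getD person []).contains item then d.modify item 0 (· + 1) else d) d) d).keys
      = d.keys := by
  induction L generalizing d with
  | nil => rfl
  | cons x xs ih =>
    simp only [List.foldl_cons]
    have hk : (pd.keys.foldl (fun d person =>
        if (pd.getD person []).contains x then d.modify x 0 (· + 1) else d) d).keys = d.keys :=
      keys_cond_modify_loop pd.keys (fun _ => x) (fun p => (pd.getD p []).contains x) d
        (fun _ _ _ => h x (List.mem_cons_self ..))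
    rw [ih _ (by rw [hk]; exact fun y hy => h y (List.mem_cons_of_mem _ hy)), hk]

-- B's Counter loop: the count of k is the number of value lists that contain k.
theorem getD_counter_loop (L : List (List String)) (c : PySem.Dict String Int) (k : String) :
    (L.foldl (fun c items =>
        (PySem.Set.ofList items).foldl (fun c it => c.modify it 0 (· + 1)) c) c).getD k 0
      = c.getD k 0 + (L.countP (fun l => l.contains k) : Int) := by
  induction L generalizing c with
  | nil => simp
  | cons items rest ih =>
    simp only [List.foldl_cons, List.countP_cons]
    rw [ih, PySem.Dict.getD_foldl_modify_add_one]
    by_cases hm : k ∈ items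
    · have hms : k ∈ PySem.Set.ofList items := (PySem.Set.mem_ofList _ _).2 hm
      rw [List.count_eq_one_of_mem (PySem.Set.nodup_ofList _) hms]
      have hct : items.contains k = true := by simpa using hm
      simp only [hct, if_pos]
      push_cast
      omega
    · have hms : k ∉ PySem.Set.ofList items := fun h => hm ((PySem.Set.mem_ofList _ _).1 h)
      rw [List.count_eq_zero.2 hms]
      have : items.contains k = false := by simpa using hm
      rw [this]
      simp

theorem get_total_counts_eq (person_item : List (String × List String))
    (item_price : List (String × Int)) :
    get_total_counts person_item item_price = get_total_counts_alt person_item item_price := by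
  unfold get_total_counts get_total_counts_alt
  set pd := PySem.Dict.ofList person_item with hpd
  set ipd := PySem.Dict.ofList item_price with hipd
  have hnodup : ipd.keys.Nodup := PySem.Dict.nodup_keys_ofList _
  -- A side: zeroed dict, then nested conditional increments
  set d0 : PySem.Dict String Int :=
    ipd.keys.foldl (fun d item => d.insert item 0) PySem.Dict.empty with hd0
  have hkeys0 : d0.keys = ipd.keys := by
    rw [hd0, PySem.Dict.keys_foldl_insert]
    simp only [PySem.Dict.keys_empty]
    rw [PySem.Set.update_nil_left]
    exact PySem.Set.ofList_eq_self_of_nodup _ hnodup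
  set dA := ipd.keys.foldl (fun d item =>
      pd.keys.foldl (fun d person =>
        if (pd.getD person []).contains item then d.modify item 0 (· + 1) else d) d) d0 with hdA
  have hkA : dA.keys = ipd.keys := by
    rw [hdA, keys_A_loop pd ipd.keys d0 (fun item hi => by rw [hkeys0]; exact hi), hkeys0]
  -- B side: counter over the value lists, then a fresh-insert mapping pass
  set cnt : PySem.Dict String Int :=
    pd.values.foldl (fun c items =>
      (PySem.Set.ofList items).foldl (fun c it => c.modify it 0 (· + 1)) c)
      PySem.Dict.empty with hcnt
  have hcntk : ∀ k, cnt.getD k 0 = (pd.values.countP (fun l => l.contains k) : Int) := by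
    intro k
    rw [hcnt, getD_counter_loop]
    simp
  have hvals : ∀ k, (pd.values.countP (fun l => l.contains k) : Int)
      = (pd.keys.countP (fun p => (pd.getD p []).contains k) : Int) := by
    intro k
    rw [PySem.Dict.values_eq_map_keys pd (PySem.Dict.nodup_keys_ofList _) [], List.countP_map]
    rfl
  have hBitems : (ipd.keys.foldl (fun o item => o.insert item (cnt.getD item 0))
      PySem.Dict.empty).items = ipd.keys.map (fun k => (k, cnt.getD k 0)) := by
    have h := PySem.Dict.items_foldl_insert_fresh ipd.keys (fun x => x)
      (fun item => cnt.getD item 0) PySem.Dict.empty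
      (fun a _ => PySem.Dict.contains_empty a) (by simpa using hnodup)
    simpa using h
  rw [hBitems, PySem.Dict.items_eq_map_keys dA (hkA ▸ hnodup) 0, hkA]
  refine List.map_congr_left (fun k hk => ?_)
  rw [hdA, getD_A_loop pd ipd.keys hnodup d0 k, getD_zero_loop _ _ _ (by simp), hcntk, hvals]
  simp [hk]

-- ===== VERDICT =====
theorem get_total_counts_spec : Claim_equal_get_total_counts := by
  intro person_item item_price _
  show _ = _
  exact get_total_counts_eq person_item item_price
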